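-- pv_equiv track=rewrite | github.com/aoracle/spx-analyzer | spx_5min.py | is_psychological_level
-- ===== SOURCE A (Python) =====
-- def is_psychological_level(price, threshold=3):
--     """Check if price is near a psychological level"""
--     # Define SPX psychological levels
--     psych_levels = [5400,5450,
--         5500, 5550, 5600, 5650, 5700, 5750, 5800, 5850,
--         5900, 5950, 6000, 6050, 6100
--     ]
--
--     # Check if price is within threshold points of any psychological level
--     for level in psych_levels:
--         if abs(price - level) <= threshold:
--             return True
--     return False
-- ===== SOURCE B (Python) =====
-- def is_psychological_level(price, threshold=3):
--     """Check if price is near a psychological level"""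
--     # levels are the arithmetic sequence 5400, 5450, ..., 6100; pick the nearest
--     # one by a clamped closed-form index and test it alone
--     k = (price - 5400 + 25) // 50
--     if k < 0:
--         k = 0
--     elif k > 14:
--         k = 14
--     return abs(price - (5400 + 50 * k)) <= threshold
-- ===== Notes on version B (the rewrite author's own statement) =====
-- stated objective: simpler
-- what changed: Replaced the 15-element scan with a closed-form nearest-level computation: a clamped floor-division index picks the single nearest level in 5400..6100 step 50, tested once.
import Mathlib
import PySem

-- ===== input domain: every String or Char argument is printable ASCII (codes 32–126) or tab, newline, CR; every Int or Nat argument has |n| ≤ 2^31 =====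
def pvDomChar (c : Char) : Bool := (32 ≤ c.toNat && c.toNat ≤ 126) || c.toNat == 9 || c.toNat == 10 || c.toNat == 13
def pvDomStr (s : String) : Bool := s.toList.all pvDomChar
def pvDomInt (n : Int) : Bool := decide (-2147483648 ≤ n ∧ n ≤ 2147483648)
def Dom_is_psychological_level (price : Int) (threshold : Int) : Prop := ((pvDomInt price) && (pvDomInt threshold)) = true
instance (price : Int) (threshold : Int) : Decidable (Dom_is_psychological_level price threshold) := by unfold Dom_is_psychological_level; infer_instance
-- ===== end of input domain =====

-- ===== PORT A =====
-- File: ports of A (linear scan of the level list) and B (closed-form nearest-level test); B is simpler, same values everywhere.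
-- Python's early-returning for-loop over the level list, as structural recursion.
def pvLoopA (price : Int) (threshold : Int) : List Int → Bool
  | [] => false
  | level :: rest =>
      if ((price - level).natAbs : Int) ≤ threshold then true
      else pvLoopA price threshold rest

def is_psychological_level (price : Int) (threshold : Int) : Bool :=
  pvLoopA price threshold
    [5400, 5450, 5500, 5550, 5600, 5650, 5700, 5750, 5800, 5850, 5900, 5950, 6000, 6050, 6100]

-- ===== PORT B =====
def is_psychological_level_alt (price : Int) (threshold : Int) : Bool :=
  let k0 := PySem.Int.floordiv (price - 5400 + 25) 50
  let k := if k0 < 0 then 0 else if k0 > 14 then 14 else k0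
  ((price - (5400 + 50 * k)).natAbs : Int) ≤ threshold

-- ===== PRECONDITION & SPEC =====
def Spec_is_psychological_level (price : Int) (threshold : Int) (out : Bool) : Prop := out = is_psychological_level_alt price threshold
instance (price : Int) (threshold : Int) (out : Bool) : Decidable (Spec_is_psychological_level price threshold out) := by unfold Spec_is_psychological_level; infer_instance

-- ===== CLAIM (what is proved, stated in full; the proofs are below) =====
def Claim_equal_is_psychological_level : Prop := ∀ (price : Int) (threshold : Int), Dom_is_psychological_level price threshold → Spec_is_psychological_level price threshold (is_psychological_level price threshold)

-- ===== LEMMAS AND PROOFS =====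

-- A's loop returns true iff some level in the list is within threshold.
theorem pvLoopA_iff (price threshold : Int) (L : List Int) :
    pvLoopA price threshold L = true ↔ ∃ l ∈ L, ((price - l).natAbs : Int) ≤ threshold := by
  induction L with
  | nil => simp [pvLoopA]
  | cons a rest ih =>
      simp only [pvLoopA, Bool.if_true_left, Bool.or_eq_true, decide_eq_true_eq, ih,
        List.mem_cons]
      constructor
      · rintro (h | ⟨l, hl, hle⟩)
        · exact ⟨a, Or.inl rfl, h⟩
        · exact ⟨l, Or.inr hl, hle⟩
      · rintro ⟨l, hl | hl, hle⟩
        · exact Or.inl (hl ▸ hle)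
        · exact Or.inr ⟨l, hl, hle⟩

-- every member of the level list is 5400 + 50*m for some 0 ≤ m ≤ 14
theorem pvMem_to (l : Int)
    (hl : l ∈ ([5400, 5450, 5500, 5550, 5600, 5650, 5700, 5750, 5800, 5850, 5900, 5950, 6000, 6050, 6100] : List Int)) :
    ∃ m : Int, 0 ≤ m ∧ m ≤ 14 ∧ l = 5400 + 50 * m := by
  fin_cases hl
  exacts [⟨0, by norm_num⟩, ⟨1, by norm_num⟩, ⟨2, by norm_num⟩, ⟨3, by norm_num⟩,
    ⟨4, by norm_num⟩, ⟨5, by norm_num⟩, ⟨6, by norm_num⟩, ⟨7, by norm_num⟩,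
    ⟨8, by norm_num⟩, ⟨9, by norm_num⟩, ⟨10, by norm_num⟩, ⟨11, by norm_num⟩,
    ⟨12, by norm_num⟩, ⟨13, by norm_num⟩, ⟨14, by norm_num⟩]

-- conversely, 5400 + 50*m with 0 ≤ m ≤ 14 is in the level list
theorem pvMem_of (m : Int) (h0 : 0 ≤ m) (h14 : m ≤ 14) :
    5400 + 50 * m ∈ ([5400, 5450, 5500, 5550, 5600, 5650, 5700, 5750, 5800, 5850, 5900, 5950, 6000, 6050, 6100] : List Int) := by
  interval_cases m <;> decide

-- ===== VERDICT (by name: the statement is the Claim_ definition above) =====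
theorem is_psychological_level_spec : Claim_equal_is_psychological_level := by
  intro price threshold _
  unfold Spec_is_psychological_level is_psychological_level is_psychological_level_alt
  rw [Bool.eq_iff_iff, pvLoopA_iff]
  simp only [PySem.Int.floordiv_eq_ediv_of_pos (by omega : (0:Int) < 50), decide_eq_true_eq]
  constructor
  · rintro ⟨l, hl, hle⟩
    obtain ⟨m, hm0, hm14, rfl⟩ := pvMem_to l hl
    split_ifs <;> omega
  · split_ifs with h1 h2 <;> intro hB
    · exact ⟨5400, by decide, by omega⟩
    · exact ⟨6100, by decide, by omega⟩
    · exact ⟨5400 + 50 * ((price - 5400 + 25) / 50),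
        pvMem_of _ (by omega) (by omega), by omega⟩
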